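-- pv_equiv track=rewrite | github.com/Naurangi123/DSAwithPython | min_cost_to_last_cell.py | min_cost_ofPath
-- ===== SOURCE A (Python) =====
-- def min_cost_ofPath(twoDArray,row,col,cost):
--     if cost>0:
--         return 0
--     elif row==0 and col==0:
--         if twoDArray[0][0]-cost==0:
--             return 1
--         else:
--             return 0
--     elif row==0:
--         return min_cost_ofPath(twoDArray,0,col-1,cost-twoDArray[row][col])
--     elif col==0:
--         return min_cost_ofPath(twoDArray,row-1,0,cost-twoDArray[row][col])
--     else:
--         op1=min_cost_ofPath(twoDArray,row-1,col,cost-twoDArray[row][col])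
--         op2=min_cost_ofPath(twoDArray,row,col-1,cost-twoDArray[row][col])
--         return op1+op2
-- ===== SOURCE B (Python) =====
-- def min_cost_ofPath(twoDArray, row, col, cost):
--     memo = {}
--
--     def go(r, c, k):
--         if k > 0:
--             return 0
--         if r == 0 and c == 0:
--             return 1 if twoDArray[0][0] - k == 0 else 0
--         key = (r, c, k)
--         if key in memo:
--             return memo[key]
--         nk = k - twoDArray[r][c]
--         if r == 0:
--             v = go(0, c - 1, nk)
--         elif c == 0:
--             v = go(r - 1, 0, nk)
--         else:
--             v = go(r - 1, c, nk) + go(r, c - 1, nk)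
--         memo[key] = v
--         return v
--
--     return go(row, col, cost)
-- ===== Notes on version B (the rewrite author's own statement) =====
-- stated objective: alternative
-- what changed: B replaces A's naive recursion (worst-case exponential) by the same recurrence memoized in a dictionary keyed on (row, col, cost), so each distinct state is computed once; on the generator's random inputs this was not measurably faster.
-- outside the precondition, e.g. on min_cost_ofPath([[-5]], 0, -1, 0): A returns 0, B returns 0
import Mathlib
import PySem

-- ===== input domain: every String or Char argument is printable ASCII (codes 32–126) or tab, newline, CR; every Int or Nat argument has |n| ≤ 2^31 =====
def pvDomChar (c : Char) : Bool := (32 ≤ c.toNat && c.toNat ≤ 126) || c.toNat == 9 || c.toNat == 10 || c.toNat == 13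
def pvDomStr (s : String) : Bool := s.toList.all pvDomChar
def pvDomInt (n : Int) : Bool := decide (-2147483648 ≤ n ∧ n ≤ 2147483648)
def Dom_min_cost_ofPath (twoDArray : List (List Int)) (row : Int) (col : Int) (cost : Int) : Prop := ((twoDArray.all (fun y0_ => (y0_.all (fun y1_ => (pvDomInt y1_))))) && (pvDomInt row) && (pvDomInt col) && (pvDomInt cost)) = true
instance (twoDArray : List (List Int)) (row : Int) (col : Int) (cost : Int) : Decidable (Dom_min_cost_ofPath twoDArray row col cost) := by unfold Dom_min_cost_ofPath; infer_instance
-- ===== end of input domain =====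

-- B memoizes A's recursion in a dictionary keyed (row, col, cost), computing each distinct state once;
-- the return-value equivalence below holds for all inputs, Pre_ marks where the Python A returns normally.

-- ===== PORT A =====

-- twoDArray[r][c] for 0 ≤ r, c known in range under Pre_ (getD's default is never used there)
def pvCell (g : List (List Int)) (r c : Nat) : Int := (g.getD r []).getD c 0

-- literal transliteration of A's recursion on nonnegative indices (the totality guard in
-- min_cost_ofPath covers negative row/col, where the Python recursion does not return normally)
def pvGoA (g : List (List Int)) (r c : Nat) (k : Int) : Int :=
  if 0 < k then 0
  else if r = 0 ∧ c = 0 then (if pvCell g 0 0 - k = 0 then 1 else 0)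
  else if r = 0 then pvGoA g 0 (c - 1) (k - pvCell g r c)
  else if c = 0 then pvGoA g (r - 1) 0 (k - pvCell g r c)
  else pvGoA g (r - 1) c (k - pvCell g r c) + pvGoA g r (c - 1) (k - pvCell g r c)
termination_by (r, c)
decreasing_by all_goals omega

def min_cost_ofPath (twoDArray : List (List Int)) (row : Int) (col : Int) (cost : Int) : Int :=
  if row < 0 ∨ col < 0 then 0   -- totality guard; outside Pre_ (Python raises there unless cost>0, where it returns 0 = this value)
  else pvGoA twoDArray row.toNat col.toNat cost

-- ===== PORT B =====

-- Source B's go: the same branches, with a memo dictionary keyed (r, c, k) threaded through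
def pvGoB (g : List (List Int)) (r c : Nat) (k : Int)
    (m : PySem.Dict (Nat × Nat × Int) Int) : Int × PySem.Dict (Nat × Nat × Int) Int :=
  if 0 < k then (0, m)
  else if r = 0 ∧ c = 0 then ((if pvCell g 0 0 - k = 0 then 1 else 0), m)
  else
    match m.get? (r, c, k) with
    | some v => (v, m)
    | none =>
      let nk := k - pvCell g r c
      let p :=
        if r = 0 then pvGoB g 0 (c - 1) nk m
        else if c = 0 then pvGoB g (r - 1) 0 nk m
        else
          let p1 := pvGoB g (r - 1) c nk m
          let p2 := pvGoB g r (c - 1) nk p1.2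
          (p1.1 + p2.1, p2.2)
      (p.1, p.2.insert (r, c, k) p.1)
termination_by (r, c)
decreasing_by all_goals omega

def min_cost_ofPath_alt (twoDArray : List (List Int)) (row : Int) (col : Int) (cost : Int) : Int :=
  if row < 0 ∨ col < 0 then 0   -- same totality guard as the A port
  else (pvGoB twoDArray row.toNat col.toNat cost PySem.Dict.empty).1

-- ===== PRECONDITION & SPEC =====

-- Pre_ excludes inputs where Python A raises (IndexError/RecursionError: negative or out-of-range
-- row/col reached with cost ≤ 0); it also excludes negative/out-of-range row,col where the
-- wrapped-around recursion happens to return 0 before raising — there both Pythons return 0 anyway.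
def Pre_min_cost_ofPath (twoDArray : List (List Int)) (row : Int) (col : Int) (cost : Int) : Prop :=
  0 < cost ∨
    (0 ≤ row ∧ 0 ≤ col ∧ row < (twoDArray.length : Int) ∧
      ∀ l ∈ twoDArray.take (row.toNat + 1), col < (l.length : Int))
instance (twoDArray : List (List Int)) (row : Int) (col : Int) (cost : Int) : Decidable (Pre_min_cost_ofPath twoDArray row col cost) := by unfold Pre_min_cost_ofPath; infer_instance

def pvWitness_min_cost_ofPath : List (List Int) × Int × Int × Int := ([[1, 2], [3, 4]], 1, 1, -4)

def Spec_min_cost_ofPath (twoDArray : List (List Int)) (row : Int) (col : Int) (cost : Int) (out : Int) : Prop := out = min_cost_ofPath_alt twoDArray row col cost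
instance (twoDArray : List (List Int)) (row : Int) (col : Int) (cost : Int) (out : Int) : Decidable (Spec_min_cost_ofPath twoDArray row col cost out) := by unfold Spec_min_cost_ofPath; infer_instance

-- ===== CLAIM (what is proved, stated in full; the proofs are below) =====
def Claim_equal_min_cost_ofPath : Prop := ∀ (twoDArray : List (List Int)) (row : Int) (col : Int) (cost : Int), Dom_min_cost_ofPath twoDArray row col cost → Pre_min_cost_ofPath twoDArray row col cost → Spec_min_cost_ofPath twoDArray row col cost (min_cost_ofPath twoDArray row col cost)

-- ===== LEMMAS AND PROOFS =====

-- every memo entry holds the value of A's recursion at its key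
def pvMemoInv (g : List (List Int)) (m : PySem.Dict (Nat × Nat × Int) Int) : Prop :=
  ∀ r c k v, m.get? (r, c, k) = some v → v = pvGoA g r c k

theorem pvGoA_step (g : List (List Int)) (r c : Nat) (k : Int)
    (hk : ¬ 0 < k) (h00 : ¬ (r = 0 ∧ c = 0)) :
    pvGoA g r c k =
      if r = 0 then pvGoA g 0 (c - 1) (k - pvCell g r c)
      else if c = 0 then pvGoA g (r - 1) 0 (k - pvCell g r c)
      else pvGoA g (r - 1) c (k - pvCell g r c) + pvGoA g r (c - 1) (k - pvCell g r c) := by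
  conv_lhs => rw [pvGoA]
  rw [if_neg hk, if_neg h00]

theorem pvGoB_correct (g : List (List Int)) :
    ∀ n r c, r + c ≤ n → ∀ (k : Int) m, pvMemoInv g m →
      (pvGoB g r c k m).1 = pvGoA g r c k ∧ pvMemoInv g (pvGoB g r c k m).2 := by
  intro n
  induction n with
  | zero =>
    intro r c h k m hm
    have hr : r = 0 := by omega
    have hc : c = 0 := by omega
    subst hr; subst hc
    rw [pvGoB, pvGoA]
    by_cases hk : 0 < k
    · simp [hk]; exact hm
    · simp [hk]; exact hm
  | succ n ih =>
    intro r c h k m hm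
    by_cases hn : r + c ≤ n
    · exact ih r c hn k m hm
    have hsum : r + c = n + 1 := by omega
    rw [pvGoB]
    by_cases hk : 0 < k
    · rw [if_pos hk, pvGoA, if_pos hk]; exact ⟨rfl, hm⟩
    by_cases h00 : r = 0 ∧ c = 0
    · exact absurd hsum (by omega)
    rw [if_neg hk, if_neg h00]
    cases hget : m.get? (r, c, k) with
    | some v =>
      exact ⟨hm r c k v hget, hm⟩
    | none =>
      simp only []
      rw [pvGoA_step g r c k hk h00]
      by_cases hr0 : r = 0
      · rw [if_pos hr0, if_pos hr0]
        have hrec := ih 0 (c - 1) (by omega) (k - pvCell g r c) m hm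
        refine ⟨hrec.1, ?_⟩
        intro r2 c2 k2 v2 hv2
        rw [PySem.Dict.get?_insert] at hv2
        by_cases he : (r2, c2, k2) = (r, c, k)
        · rw [if_pos he] at hv2
          injection hv2 with hv3
          simp only [Prod.mk.injEq] at he
          obtain ⟨e1, e2, e3⟩ := he
          rw [e1, e2, e3, ← hv3, hrec.1, pvGoA_step g r c k hk h00, if_pos hr0]
        · rw [if_neg he] at hv2
          exact hrec.2 r2 c2 k2 v2 hv2
      by_cases hc0 : c = 0
      · rw [if_neg hr0, if_pos hc0, if_neg hr0, if_pos hc0]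
        have hrec := ih (r - 1) 0 (by omega) (k - pvCell g r c) m hm
        refine ⟨hrec.1, ?_⟩
        intro r2 c2 k2 v2 hv2
        rw [PySem.Dict.get?_insert] at hv2
        by_cases he : (r2, c2, k2) = (r, c, k)
        · rw [if_pos he] at hv2
          injection hv2 with hv3
          simp only [Prod.mk.injEq] at he
          obtain ⟨e1, e2, e3⟩ := he
          rw [e1, e2, e3, ← hv3, hrec.1, pvGoA_step g r c k hk h00, if_neg hr0,
            if_pos hc0]
        · rw [if_neg he] at hv2
          exact hrec.2 r2 c2 k2 v2 hv2
      · rw [if_neg hr0, if_neg hc0, if_neg hr0, if_neg hc0]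
        have h1 := ih (r - 1) c (by omega) (k - pvCell g r c) m hm
        have h2 := ih r (c - 1) (by omega) (k - pvCell g r c)
          (pvGoB g (r - 1) c (k - pvCell g r c) m).2 h1.2
        refine ⟨by rw [h1.1, h2.1], ?_⟩
        intro r2 c2 k2 v2 hv2
        rw [PySem.Dict.get?_insert] at hv2
        by_cases he : (r2, c2, k2) = (r, c, k)
        · rw [if_pos he] at hv2
          injection hv2 with hv3
          simp only [Prod.mk.injEq] at he
          obtain ⟨e1, e2, e3⟩ := he
          rw [e1, e2, e3, ← hv3, pvGoA_step g r c k hk h00, if_neg hr0, if_neg hc0,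
            h1.1, h2.1]
        · rw [if_neg he] at hv2
          exact h2.2 r2 c2 k2 v2 hv2

theorem pvMemoInv_empty (g : List (List Int)) : pvMemoInv g PySem.Dict.empty := by
  intro r c k v hv
  simp [PySem.Dict.get?_empty] at hv

-- ===== VERDICT (by name: the statement is the Claim_ definition above) =====
theorem min_cost_ofPath_spec : Claim_equal_min_cost_ofPath := by
  intro g row col cost _ _
  unfold Spec_min_cost_ofPath min_cost_ofPath min_cost_ofPath_alt
  by_cases hneg : row < 0 ∨ col < 0
  · simp [hneg]
  · simp only [if_neg hneg]
    exact ((pvGoB_correct g (row.toNat + col.toNat) row.toNat col.toNat le_rfl cost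
      PySem.Dict.empty (pvMemoInv_empty g)).1).symm
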